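-- pv_equiv track=rewrite | github.com/4ktivated/algorithms | tinkoff.py | check_winning_sequence
-- ===== SOURCE A (Python) =====
-- def check_winning_sequence(n, sequence, winning_sequence):
--     first_diff_index = -1
--     last_diff_index = -1
--
--
--     for i in range(n):
--         if sequence[i] != winning_sequence[i]:
--             if first_diff_index == -1:
--                 first_diff_index = i
--             last_diff_index = i
--
--
--     if first_diff_index == -1 or first_diff_index == last_diff_index:
--         return "YES"
--     elif (
--         sequence[first_diff_index:last_diff_index+1] ==
--         winning_sequence[first_diff_index:last_diff_index+1][::-1]
--     ):
--         return "YES"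
--     elif (
--         sequence[first_diff_index:last_diff_index+1][::-1] ==
--         winning_sequence[first_diff_index:last_diff_index+1]
--     ):
--         return "YES"
--
--     return "NO"
-- ===== SOURCE B (Python) =====
-- def check_winning_sequence(n, sequence, winning_sequence):
--     # Peel matching ends off local copies (pop from the back, reverse to reach the
--     # front), then the surviving core must be one list reversed into the other.
--     m = max(n, 0)
--     s = sequence[:m]
--     w = winning_sequence[:m]
--     # peel the common suffix
--     while len(s) > 1 and s[-1] == w[-1]:
--         s.pop()
--         w.pop()
--     # peel the common prefix, by popping from the reversed lists
--     s.reverse()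
--     w.reverse()
--     while len(s) > 1 and s[-1] == w[-1]:
--         s.pop()
--         w.pop()
--     if len(s) <= 1:
--         return "YES"
--     return "YES" if s == w[::-1] else "NO"
-- ===== Notes on version B (the rewrite author's own statement) =====
-- stated objective: alternative
-- what changed: Replaces A's index fold that records first/last mismatch indices plus two slice/reverse comparisons by end-peeling of local list copies (pop matching tails, reverse the lists to peel the head the same way) followed by one reversal comparison of the surviving core; no indices are computed at all.
import Mathlib
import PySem

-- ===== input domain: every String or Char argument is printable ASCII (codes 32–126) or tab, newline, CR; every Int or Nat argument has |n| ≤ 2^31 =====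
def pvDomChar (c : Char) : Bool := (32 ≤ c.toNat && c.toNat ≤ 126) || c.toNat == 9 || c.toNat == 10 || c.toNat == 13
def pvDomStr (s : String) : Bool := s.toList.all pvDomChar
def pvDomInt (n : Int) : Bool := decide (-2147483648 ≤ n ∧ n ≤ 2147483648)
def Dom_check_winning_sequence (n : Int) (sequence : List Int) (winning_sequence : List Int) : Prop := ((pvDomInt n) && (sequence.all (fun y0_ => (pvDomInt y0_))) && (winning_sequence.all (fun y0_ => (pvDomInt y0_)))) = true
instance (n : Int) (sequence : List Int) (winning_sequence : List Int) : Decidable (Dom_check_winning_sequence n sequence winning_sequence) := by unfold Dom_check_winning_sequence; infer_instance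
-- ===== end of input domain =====

-- B replaces A's (first,last)-index-recording pass plus slice/reverse comparisons by end-peeling of
-- local list copies (pop matching tails, reverse to peel the head) with one final reversal compare
-- of the surviving core (objective: alternative decomposition).


-- ===== PORT A =====
def check_winning_sequence (n : Int) (sequence : List Int) (winning_sequence : List Int) : String :=
  let st := (PySem.List.pyRange 0 n 1).foldl
    (fun (st : Int × Int) i =>
      if PySem.List.pyGetD sequence i 0 ≠ PySem.List.pyGetD winning_sequence i 0 then
        (if st.1 = -1 then (i, i) else (st.1, i))
      else st)
    (-1, -1)
  if st.1 = -1 ∨ st.1 = st.2 then "YES"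
  else if PySem.List.slice sequence (some st.1) (some (st.2 + 1)) =
          (PySem.List.slice winning_sequence (some st.1) (some (st.2 + 1))).reverse then "YES"
  else if (PySem.List.slice sequence (some st.1) (some (st.2 + 1))).reverse =
          PySem.List.slice winning_sequence (some st.1) (some (st.2 + 1)) then "YES"
  else "NO"

-- ===== PORT B =====
-- while len(s) > 1 and s[-1] == w[-1]: s.pop(); w.pop()
-- (list.pop() with no argument drops the last element: dropLast is that state update)
def pvPeel (s w : List Int) : List Int × List Int :=
  if _h : 1 < s.length ∧ PySem.List.pyGetD s (-1) 0 = PySem.List.pyGetD w (-1) 0 then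
    pvPeel s.dropLast w.dropLast
  else (s, w)
termination_by s.length
decreasing_by simpa [List.length_dropLast] using by omega

def check_winning_sequence_alt (n : Int) (sequence : List Int) (winning_sequence : List Int) : String :=
  let m := max n 0
  let s0 := PySem.List.slice sequence none (some m)          -- s = sequence[:m]
  let w0 := PySem.List.slice winning_sequence none (some m)  -- w = winning_sequence[:m]
  let p1 := pvPeel s0 w0                                     -- peel the common suffix
  let p2 := pvPeel p1.1.reverse p1.2.reverse                 -- s.reverse(); w.reverse(); peel again
  if p2.1.length ≤ 1 then "YES"
  else if p2.1 = p2.2.reverse then "YES" else "NO"           -- s == w[::-1]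

-- ===== PRECONDITION & SPEC =====
-- Pre_ excludes exactly the inputs where Python A raises IndexError: n larger than a list's length.
def Pre_check_winning_sequence (n : Int) (sequence : List Int) (winning_sequence : List Int) : Prop :=
  n ≤ sequence.length ∧ n ≤ winning_sequence.length
instance (n : Int) (sequence : List Int) (winning_sequence : List Int) : Decidable (Pre_check_winning_sequence n sequence winning_sequence) := by unfold Pre_check_winning_sequence; infer_instance

def pvWitness_check_winning_sequence : Int × List Int × List Int := (4, [1, 2, 3, 4], [1, 3, 2, 4])

def Spec_check_winning_sequence (n : Int) (sequence : List Int) (winning_sequence : List Int) (out : String) : Prop := out = check_winning_sequence_alt n sequence winning_sequence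
instance (n : Int) (sequence : List Int) (winning_sequence : List Int) (out : String) : Decidable (Spec_check_winning_sequence n sequence winning_sequence out) := by unfold Spec_check_winning_sequence; infer_instance

-- ===== CLAIM (what is proved, stated in full; the proofs are below) =====
def Claim_equal_check_winning_sequence : Prop := ∀ (n : Int) (sequence : List Int) (winning_sequence : List Int), Dom_check_winning_sequence n sequence winning_sequence → Pre_check_winning_sequence n sequence winning_sequence → Spec_check_winning_sequence n sequence winning_sequence (check_winning_sequence n sequence winning_sequence)
-- ===== LEMMAS AND PROOFS =====

-- mismatch predicate at a Nat index
def pvMis (s w : List Int) (k : Nat) : Prop := s.getD k 0 ≠ w.getD k 0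

-- A's loop state, as a fold over List.range
def pvFoldA (s w : List Int) (N : Nat) : Int × Int :=
  (List.range N).foldl (fun (st : Int × Int) (k : Nat) =>
    if PySem.List.pyGetD s (0 + (k : Int)) 0 ≠ PySem.List.pyGetD w (0 + (k : Int)) 0 then
      (if st.1 = -1 then ((0 + (k : Int)), (0 + (k : Int))) else (st.1, (0 + (k : Int))))
    else st) (-1, -1)

-- fold over range N records first and last mismatch index
theorem pv_fold_char (s w : List Int) (N : Nat) :
    (pvFoldA s w N = (-1, -1) ∧ ∀ k < N, ¬ pvMis s w k) ∨
    (∃ f l : Nat, pvFoldA s w N = ((f : Int), (l : Int)) ∧ f ≤ l ∧ l < N ∧ pvMis s w f ∧ pvMis s w l ∧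
      (∀ k < f, ¬ pvMis s w k) ∧ (∀ k, l < k → k < N → ¬ pvMis s w k)) := by
  induction N with
  | zero => exact Or.inl ⟨rfl, by omega⟩
  | succ N ih =>
    unfold pvFoldA at ih ⊢
    simp only [List.range_succ, List.foldl_append, List.foldl_cons, List.foldl_nil,
      PySem.List.pyGetD_natCast, zero_add] at ih ⊢
    rcases ih with ⟨h1, h2⟩ | ⟨f, l, heq, hfl, hlN, hf, hl, hmin, hmax⟩
    · rw [h1]
      by_cases hm : pvMis s w N
      · right
        refine ⟨N, N, ?_, le_refl _, Nat.lt_succ_self _, hm, hm, h2, by omega⟩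
        unfold pvMis at hm
        rw [if_pos hm, if_pos rfl]
      · left
        refine ⟨?_, ?_⟩
        · unfold pvMis at hm
          rw [if_neg hm]
        · intro k hk
          rcases Nat.lt_succ_iff_lt_or_eq.mp hk with h | h
          · exact h2 k h
          · subst h; exact hm
    · rw [heq]
      right
      by_cases hm : pvMis s w N
      · refine ⟨f, N, ?_, by omega, Nat.lt_succ_self _, hf, hm, hmin, by omega⟩
        unfold pvMis at hm
        rw [if_pos hm, if_neg (by omega : ¬ ((f : Int) = -1))]
      · refine ⟨f, l, ?_, hfl, by omega, hf, hl, hmin, ?_⟩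
        · unfold pvMis at hm
          rw [if_neg hm]
        · intro k hk1 hk2
          rcases Nat.lt_succ_iff_lt_or_eq.mp hk2 with h | h
          · exact hmax k hk1 h
          · subst h; exact hm

-- getD through take
theorem pv_getD_take (s : List Int) (m k : Nat) (h : k < m) :
    (s.take m).getD k 0 = s.getD k 0 := by
  simp [List.getD_eq_getElem?_getD, h]

-- getD through reverse
theorem pv_getD_reverse (t : List Int) (j : Nat) (h : j < t.length) :
    t.reverse.getD j 0 = t.getD (t.length - 1 - j) 0 := by
  rw [List.getD_eq_getElem _ _ (by simpa using h),
      List.getD_eq_getElem _ _ (by omega), List.getElem_reverse]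

-- s[-1] of a nonempty list is its last element
theorem pv_neg_one (s : List Int) (h : 0 < s.length) :
    PySem.List.pyGetD s (-1) 0 = s.getD (s.length - 1) 0 := by
  rw [PySem.List.pyGetD_neg_one s 0 (by intro hc; subst hc; simp at h),
      List.getLast_eq_getElem, List.getD_eq_getElem _ _ (by omega)]

-- the peel loop with mismatches stops right after the last mismatch
theorem pv_peel_last : ∀ (M : Nat) (s w : List Int), s.length = M → s.length = w.length →
    ∀ L : Nat, L < s.length → pvMis s w L → (∀ k, L < k → k < s.length → ¬ pvMis s w k) →
    pvPeel s w = (s.take (L + 1), w.take (L + 1)) := by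
  intro M
  induction M with
  | zero => intro s w hM _ L hL _ _; omega
  | succ M ih =>
    intro s w hM hlen L hL hmis hmax
    by_cases hend : s.length = L + 1
    · have hstop : pvPeel s w = (s, w) := by
        rw [pvPeel, dif_neg]
        rintro ⟨h1, h2⟩
        rw [pv_neg_one s (by omega), pv_neg_one w (by omega), ← hlen, hend] at h2
        simp only [Nat.add_sub_cancel] at h2
        exact hmis h2
      rw [hstop, List.take_of_length_le (by omega), List.take_of_length_le (by omega)]
    · have hgt : L + 1 < s.length := by omega
      have hguard : 1 < s.length ∧
          PySem.List.pyGetD s (-1) 0 = PySem.List.pyGetD w (-1) 0 := by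
        refine ⟨by omega, ?_⟩
        rw [pv_neg_one s (by omega), pv_neg_one w (by omega), ← hlen]
        have := hmax (s.length - 1) (by omega) (by omega)
        unfold pvMis at this
        exact not_not.mp this
      rw [pvPeel, dif_pos hguard]
      have hds : s.dropLast = s.take (s.length - 1) := List.dropLast_eq_take ..
      have hdw : w.dropLast = w.take (w.length - 1) := List.dropLast_eq_take ..
      have key := ih s.dropLast w.dropLast
        (by simp [List.length_dropLast]; omega)
        (by simp [List.length_dropLast]; omega) L
        (by simp [List.length_dropLast]; omega)
        (by unfold pvMis at hmis ⊢
            rw [hds, hdw, pv_getD_take _ _ _ (by omega), pv_getD_take _ _ _ (by omega)]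
            exact hmis)
        (by intro k hk1 hk2
            simp only [List.length_dropLast] at hk2
            unfold pvMis
            rw [hds, hdw, pv_getD_take _ _ _ (by omega), pv_getD_take _ _ _ (by omega)]
            exact hmax k hk1 (by omega))
      rw [key, hds, hdw, List.take_take, List.take_take]
      congr 2 <;> omega

-- the peel loop on equal lists stops at length one
theorem pv_peel_eq : ∀ (M : Nat) (s : List Int), s.length = M →
    pvPeel s s = (s.take 1, s.take 1) := by
  intro M
  induction M with
  | zero =>
    intro s hM
    have : s = [] := List.eq_nil_of_length_eq_zero hM
    subst this
    rw [pvPeel, dif_neg (by simp)]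
    rfl
  | succ M ih =>
    intro s hM
    by_cases h1 : s.length ≤ 1
    · rw [pvPeel, dif_neg (by rintro ⟨hc, _⟩; omega)]
      rw [List.take_of_length_le h1]
    · rw [pvPeel, dif_pos ⟨by omega, rfl⟩]
      rw [ih s.dropLast (by simp [List.length_dropLast]; omega)]
      rw [List.dropLast_eq_take .., List.take_take]
      congr 2 <;> omega

theorem pv_main : ∀ (n : Int) (s w : List Int),
    n ≤ s.length → n ≤ w.length →
    check_winning_sequence n s w = check_winning_sequence_alt n s w := by
  intro n s w hs hw
  by_cases hn : n ≤ 0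
  · have hA : check_winning_sequence n s w = "YES" := by
      unfold check_winning_sequence
      rw [PySem.List.pyRange_one]
      rw [show (n - 0).toNat = 0 by omega]
      simp
    have hB : check_winning_sequence_alt n s w = "YES" := by
      simp only [check_winning_sequence_alt]
      rw [show max n 0 = ((0 : Nat) : Int) by omega]
      rw [PySem.List.slice_to_natCast, PySem.List.slice_to_natCast]
      simp only [List.take_zero]
      simp only [pv_peel_eq 0 ([] : List Int) rfl, List.take_nil, List.reverse_nil]
      simp
    rw [hA, hB]
  · obtain ⟨N, hN⟩ : ∃ N : Nat, n = (N : Int) := ⟨n.toNat, by omega⟩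
    subst hN
    have hNs : N ≤ s.length := by omega
    have hNw : N ≤ w.length := by omega
    -- A's fold over pyRange equals the fold over List.range N
    have hAB : (PySem.List.pyRange 0 (N : Int) 1).foldl
          (fun (st : Int × Int) i =>
            if PySem.List.pyGetD s i 0 ≠ PySem.List.pyGetD w i 0 then
              (if st.1 = -1 then (i, i) else (st.1, i))
            else st) (-1, -1) = pvFoldA s w N := by
      unfold pvFoldA
      rw [PySem.List.pyRange_one]
      rw [show ((N : Int) - 0).toNat = N by omega]
      rw [List.foldl_map]
    -- B's truncated copies
    have hmax0 : max ((N : Nat) : Int) 0 = ((N : Nat) : Int) := by omega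
    have hs0 : PySem.List.slice s none (some ((N : Nat) : Int)) = s.take N :=
      PySem.List.slice_to_natCast ..
    have hw0 : PySem.List.slice w none (some ((N : Nat) : Int)) = w.take N :=
      PySem.List.slice_to_natCast ..
    have hls0 : (s.take N).length = N := by simp [List.length_take]; omega
    have hlw0 : (w.take N).length = N := by simp [List.length_take]; omega
    rcases pv_fold_char s w N with ⟨hst, hnone⟩ | ⟨f, l, hst, hfl, hlN, hf, hl, hmin, hmax⟩
    · -- no mismatch at all
      have hA : check_winning_sequence (N : Int) s w = "YES" := by
        unfold check_winning_sequence
        rw [hAB, hst]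
        rw [if_pos (Or.inl rfl)]
      have hB : check_winning_sequence_alt (N : Int) s w = "YES" := by
        have hsw : s.take N = w.take N := by
          apply List.ext_getElem (by omega)
          intro k h1 h2
          have hk : k < N := by simp [List.length_take] at h1; omega
          have heq : s.getD k 0 = w.getD k 0 := not_not.mp (hnone k hk)
          rw [List.getElem_take, List.getElem_take]
          rw [List.getD_eq_getElem s 0 (by omega), List.getD_eq_getElem w 0 (by omega)] at heq
          exact heq
        simp only [check_winning_sequence_alt]
        rw [hmax0, hs0, hw0, ← hsw]
        rw [pv_peel_eq (s.take N).length _ rfl]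
        rw [pv_peel_eq ((s.take N).take 1).reverse.length _ rfl]
        rw [if_pos (by simp [List.length_take])]
      rw [hA, hB]
    · -- first mismatch f, last mismatch l
      have hlt1 : l + 1 ≤ N := by omega
      -- the first peel stops right after l
      have hlts : (s.take (l + 1)).length = l + 1 := by simp [List.length_take]; omega
      have hltw : (w.take (l + 1)).length = l + 1 := by simp [List.length_take]; omega
      have hp1 : pvPeel (s.take N) (w.take N) = (s.take (l + 1), w.take (l + 1)) := by
        have hmisN : pvMis (s.take N) (w.take N) l := by
          unfold pvMis at hl ⊢
          rw [pv_getD_take s N l (by omega), pv_getD_take w N l (by omega)]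
          exact hl
        have hmaxN : ∀ k, l < k → k < (s.take N).length → ¬ pvMis (s.take N) (w.take N) k := by
          intro k hk1 hk2
          rw [hls0] at hk2
          unfold pvMis
          rw [pv_getD_take s N k (by omega), pv_getD_take w N k (by omega)]
          exact hmax k hk1 hk2
        rw [pv_peel_last (s.take N).length (s.take N) (w.take N) rfl (by rw [hls0, hlw0]) l
          (by rw [hls0]; omega) hmisN hmaxN]
        rw [List.take_take, List.take_take]
        congr 2 <;> omega
      -- the second peel (on the reversed lists) stops right after index l - f
      have hp2 : pvPeel (s.take (l + 1)).reverse (w.take (l + 1)).reverse =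
          ((s.take (l + 1)).reverse.take (l - f + 1), (w.take (l + 1)).reverse.take (l - f + 1)) := by
        have hmisrev : pvMis (s.take (l + 1)).reverse (w.take (l + 1)).reverse (l - f) := by
          unfold pvMis
          rw [pv_getD_reverse (s.take (l + 1)) (l - f) (by rw [hlts]; omega),
              pv_getD_reverse (w.take (l + 1)) (l - f) (by rw [hltw]; omega), hlts, hltw,
              show l + 1 - 1 - (l - f) = f by omega,
              pv_getD_take s (l + 1) f (by omega), pv_getD_take w (l + 1) f (by omega)]
          exact hf
        have hmaxrev : ∀ k, l - f < k → k < (s.take (l + 1)).reverse.length →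
            ¬ pvMis (s.take (l + 1)).reverse (w.take (l + 1)).reverse k := by
          intro k hk1 hk2
          rw [List.length_reverse, hlts] at hk2
          unfold pvMis
          rw [pv_getD_reverse (s.take (l + 1)) k (by rw [hlts]; omega),
              pv_getD_reverse (w.take (l + 1)) k (by rw [hltw]; omega), hlts, hltw,
              pv_getD_take s (l + 1) (l + 1 - 1 - k) (by omega),
              pv_getD_take w (l + 1) (l + 1 - 1 - k) (by omega)]
          exact not_not_intro (not_not.mp (hmin (l + 1 - 1 - k) (by omega)))
        exact pv_peel_last (s.take (l + 1)).reverse.length _ _ rfl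
          (by rw [List.length_reverse, List.length_reverse, hlts, hltw]) (l - f)
          (by rw [List.length_reverse, hlts]; omega) hmisrev hmaxrev
      by_cases hfeql : f = l
      · subst hfeql
        have hAv : check_winning_sequence ((N : Nat) : Int) s w = "YES" := by
          unfold check_winning_sequence
          rw [hAB, hst, if_pos (Or.inr rfl)]
        have hBv : check_winning_sequence_alt ((N : Nat) : Int) s w = "YES" := by
          simp only [check_winning_sequence_alt]
          rw [hmax0, hs0, hw0, hp1, hp2]
          rw [if_pos (by simp [List.length_take])]
        rw [hAv, hBv]
      · have hflt : f < l := by omega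
        have hne : ¬ ((f : Int) = -1 ∨ (f : Int) = (l : Int)) := by
          rintro (hc | hc) <;> omega
        -- the two cores, as drop/take of the originals
        have hXs : (s.take (l + 1)).reverse.take (l - f + 1) = ((s.drop f).take (l + 1 - f)).reverse := by
          rw [List.take_reverse, hlts, show l + 1 - (l - f + 1) = f by omega, List.drop_take,
              show l + 1 - f = l + 1 - f from rfl]
        have hXw : (w.take (l + 1)).reverse.take (l - f + 1) = ((w.drop f).take (l + 1 - f)).reverse := by
          rw [List.take_reverse, hltw, show l + 1 - (l - f + 1) = f by omega, List.drop_take,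
              show l + 1 - f = l + 1 - f from rfl]
        -- A's slices
        have hslA : ∀ u : List Int, PySem.List.slice u (some ((f : Nat) : Int)) (some (((l : Nat) : Int) + 1)) =
            (u.drop f).take (l + 1 - f) := by
          intro u
          rw [show (((l : Nat) : Int) + 1) = (((l + 1 : Nat)) : Int) by push_cast; ring]
          rw [PySem.List.slice_natCast]
        have hlenX : ((s.drop f).take (l + 1 - f)).length = l + 1 - f := by
          simp [List.length_take, List.length_drop]; omega
        simp only [check_winning_sequence, check_winning_sequence_alt]
        rw [hAB, hst, hmax0, hs0, hw0, hp1, hp2, hXs, hXw, hslA s, hslA w, if_neg hne]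
        simp only [List.reverse_reverse, List.length_reverse, hlenX]
        rw [if_neg (by omega : ¬ (l + 1 - f ≤ 1))]
        by_cases hc : ((s.drop f).take (l + 1 - f)).reverse = (w.drop f).take (l + 1 - f)
        · rw [if_pos (List.reverse_eq_iff.mp hc), if_pos hc]
        · rw [if_neg (fun h => hc (List.reverse_eq_iff.mpr h)), if_neg hc]

-- ===== VERDICT (by name: the statement is the Claim_ definition above) =====
theorem check_winning_sequence_spec : Claim_equal_check_winning_sequence := by
  intro n s w _ hpre
  exact pv_main n s w hpre.1 hpre.2
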